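-- pv_equiv track=rewrite | github.com/galaxybomb23/LAFVT | analyzer/bin_leopard.py | compute_bins
-- ===== SOURCE A (Python) =====
-- from typing import List, Tuple
--
-- def compute_bins(scores: List[int]) -> List[Tuple[int, int]]:
--     if not scores:
--         return []
--     lo = min(scores)
--     hi = max(scores)
--     if lo == hi:
--         return [(lo, hi)]
--     uniq = sorted(set(scores))
--     return [(v, v) for v in uniq]
-- ===== SOURCE B (Python) =====
-- def compute_bins(scores):
--     def merge(a, b):
--         out = []
--         i = j = 0
--         while i < len(a) and j < len(b):
--             if a[i] < b[j]:
--                 out.append(a[i]); i += 1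
--             elif b[j] < a[i]:
--                 out.append(b[j]); j += 1
--             else:
--                 out.append(a[i]); i += 1; j += 1
--         out.extend(a[i:])
--         out.extend(b[j:])
--         return out
--
--     def msort(xs):
--         if len(xs) <= 1:
--             return xs
--         mid = len(xs) // 2
--         return merge(msort(xs[:mid]), msort(xs[mid:]))
--
--     return [(v, v) for v in msort(scores)]
-- ===== Notes on version B (the rewrite author's own statement) =====
-- stated objective: alternative
-- what changed: Replaces the library sort over a set (plus separate min/max special-casing) with a hand-written divide-and-conquer merge sort whose merge step consumes equal heads together, so duplicates disappear during merging and no set, library sort, min or max is used.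
import Mathlib
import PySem

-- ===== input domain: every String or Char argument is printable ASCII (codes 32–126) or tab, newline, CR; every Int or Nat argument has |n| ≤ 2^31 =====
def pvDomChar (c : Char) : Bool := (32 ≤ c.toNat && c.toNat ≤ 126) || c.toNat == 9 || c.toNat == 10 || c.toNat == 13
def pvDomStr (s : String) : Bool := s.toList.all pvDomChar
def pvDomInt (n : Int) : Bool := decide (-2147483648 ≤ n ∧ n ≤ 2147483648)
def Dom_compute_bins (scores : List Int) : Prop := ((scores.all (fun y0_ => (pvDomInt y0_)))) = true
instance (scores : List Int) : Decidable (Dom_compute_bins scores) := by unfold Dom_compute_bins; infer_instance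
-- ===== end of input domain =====

-- B replaces A's set-dedup-and-sort (with min/max special cases) by a hand-written merge sort whose merge consumes equal heads together, deduplicating as it sorts (same result, different algorithm).


-- ===== PORT A =====
def compute_bins (scores : List Int) : List (Int × Int) :=
  if scores = [] then []
  else
    match PySem.List.min? scores (fun x => x), PySem.List.max? scores (fun x => x) with
    | some lo, some hi =>
        if lo = hi then [(lo, hi)]
        else (PySem.List.sorted (PySem.Set.ofList scores) (fun x => x) false).map (fun v => (v, v))
    | _, _ => []

-- ===== PORT B =====
/-- B's `merge`: the two-pointer while loop over `a`/`b` as structural recursion;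
    equal heads are consumed together (the dedup), leftovers are appended. -/
def dmerge : List Int → List Int → List Int
  | [], b => b
  | x :: a, [] => x :: a
  | x :: a, y :: b =>
      if x < y then x :: dmerge a (y :: b)
      else if y < x then y :: dmerge (x :: a) b
      else x :: dmerge a b

/-- B's `msort`: split at `len // 2`, recurse, merge. -/
def dsort (xs : List Int) : List Int :=
  if xs.length ≤ 1 then xs
  else dmerge (dsort (xs.take (xs.length / 2))) (dsort (xs.drop (xs.length / 2)))
  termination_by xs.length
  decreasing_by
    · simp only [List.length_take]; omega
    · simp only [List.length_drop]; omega

def compute_bins_alt (scores : List Int) : List (Int × Int) :=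
  (dsort scores).map (fun v => (v, v))

-- ===== PRECONDITION & SPEC =====
def Spec_compute_bins (scores : List Int) (out : List (Int × Int)) : Prop := out = compute_bins_alt scores
instance (scores : List Int) (out : List (Int × Int)) : Decidable (Spec_compute_bins scores out) := by unfold Spec_compute_bins; infer_instance

-- ===== CLAIM (what is proved, stated in full; the proofs are below) =====
def Claim_equal_compute_bins : Prop := ∀ (scores : List Int), Dom_compute_bins scores → Spec_compute_bins scores (compute_bins scores)

-- ===== LEMMAS AND PROOFS =====

lemma mem_dmerge : ∀ (a b : List Int) (x : Int), x ∈ dmerge a b ↔ x ∈ a ∨ x ∈ b := by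
  intro a b
  induction a, b using dmerge.induct with
  | case1 b => simp [dmerge]
  | case2 x a => simp [dmerge]
  | case3 x a y b hxy ih =>
    intro z
    rw [dmerge, if_pos hxy]
    simp only [List.mem_cons, ih]
    tauto
  | case4 x a y b hxy hyx ih =>
    intro z
    rw [dmerge, if_neg hxy, if_pos hyx]
    simp only [List.mem_cons, ih]
    tauto
  | case5 x a y b hxy hyx ih =>
    intro z
    rw [dmerge, if_neg hxy, if_neg hyx]
    have hxeqy : x = y := by omega
    simp only [List.mem_cons, ih, hxeqy]
    tauto

lemma pairwise_dmerge : ∀ (a b : List Int),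
    a.Pairwise (· < ·) → b.Pairwise (· < ·) → (dmerge a b).Pairwise (· < ·) := by
  intro a b
  induction a, b using dmerge.induct with
  | case1 b => intro _ hb; simpa [dmerge]
  | case2 x a => intro ha _; simpa [dmerge] using ha
  | case3 x a y b hxy ih =>
    intro ha hb
    rw [dmerge, if_pos hxy]
    have ha' := List.pairwise_cons.mp ha
    refine List.pairwise_cons.mpr ⟨?_, ih ha'.2 hb⟩
    intro z hz
    rcases (mem_dmerge a (y :: b) z).mp hz with hz | hz
    · exact ha'.1 z hz
    · rcases List.mem_cons.mp hz with rfl | hz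
      · exact hxy
      · exact lt_trans hxy ((List.pairwise_cons.mp hb).1 z hz)
  | case4 x a y b hxy hyx ih =>
    intro ha hb
    rw [dmerge, if_neg hxy, if_pos hyx]
    have hb' := List.pairwise_cons.mp hb
    refine List.pairwise_cons.mpr ⟨?_, ih ha hb'.2⟩
    intro z hz
    rcases (mem_dmerge (x :: a) b z).mp hz with hz | hz
    · rcases List.mem_cons.mp hz with rfl | hz
      · exact hyx
      · exact lt_trans hyx ((List.pairwise_cons.mp ha).1 z hz)
    · exact hb'.1 z hz
  | case5 x a y b hxy hyx ih =>
    intro ha hb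
    rw [dmerge, if_neg hxy, if_neg hyx]
    have hxeqy : x = y := by omega
    have ha' := List.pairwise_cons.mp ha
    have hb' := List.pairwise_cons.mp hb
    refine List.pairwise_cons.mpr ⟨?_, ih ha'.2 hb'.2⟩
    intro z hz
    rcases (mem_dmerge a b z).mp hz with hz | hz
    · exact ha'.1 z hz
    · exact hxeqy ▸ hb'.1 z hz

lemma mem_dsort : ∀ (xs : List Int) (x : Int), x ∈ dsort xs ↔ x ∈ xs := by
  intro xs
  induction xs using dsort.induct with
  | case1 xs h => intro x; rw [dsort, if_pos h]
  | case2 xs h ihl ihr =>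
    intro x
    rw [dsort, if_neg h, mem_dmerge, ihl, ihr, ← List.mem_append,
      List.take_append_drop]

lemma pairwise_dsort : ∀ (xs : List Int), (dsort xs).Pairwise (· < ·) := by
  intro xs
  induction xs using dsort.induct with
  | case1 xs h =>
    rw [dsort, if_pos h]
    match xs, h with
    | [], _ => simp
    | [a], _ => simp
  | case2 xs h ihl ihr =>
    rw [dsort, if_neg h]
    exact pairwise_dmerge _ _ ihl ihr

lemma dsort_eq_sorted_set (scores : List Int) :
    dsort scores = PySem.List.sorted (PySem.Set.ofList scores) (fun x => x) false := by
  symm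
  apply PySem.List.sorted_eq_of_perm_of_pairwise_lt
  · apply (List.perm_ext_iff_of_nodup
      ((pairwise_dsort scores).imp ne_of_lt) (PySem.Set.nodup_ofList _)).mpr
    intro x
    rw [mem_dsort, PySem.Set.mem_ofList]
  · simpa using pairwise_dsort scores

lemma sorted_set_singleton (scores : List Int) (lo : Int)
    (hmin : PySem.List.min? scores (fun x => x) = some lo)
    (hmax : PySem.List.max? scores (fun x => x) = some lo) :
    PySem.List.sorted (PySem.Set.ofList scores) (fun x => x) false = [lo] := by
  apply PySem.List.sorted_eq_of_perm_of_pairwise_lt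
  · apply (List.perm_ext_iff_of_nodup (by simp) (PySem.Set.nodup_ofList _)).mpr
    intro x
    simp only [PySem.Set.mem_ofList, List.mem_singleton]
    constructor
    · rintro rfl; exact PySem.List.min?_mem hmin
    · intro hx
      have h1 := PySem.List.min?_isMin hmin x hx
      have h2 := PySem.List.max?_isMax hmax x hx
      simp at h1 h2
      omega
  · simp

theorem compute_bins_eq (scores : List Int) : compute_bins scores = compute_bins_alt scores := by
  unfold compute_bins compute_bins_alt
  rw [dsort_eq_sorted_set]
  by_cases hnil : scores = []
  · subst hnil
    simp [PySem.List.sorted, PySem.Set.ofList]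
  · simp only [if_neg hnil]
    obtain ⟨lo, hlo⟩ : ∃ lo, PySem.List.min? scores (fun x => x) = some lo :=
      Option.ne_none_iff_exists'.mp
        (fun h => hnil ((PySem.List.min?_eq_none_iff scores (fun x => x)).mp h))
    obtain ⟨hi, hhi⟩ : ∃ hi, PySem.List.max? scores (fun x => x) = some hi :=
      Option.ne_none_iff_exists'.mp
        (fun h => hnil ((PySem.List.max?_eq_none_iff scores (fun x => x)).mp h))
    rw [hlo, hhi]
    by_cases heq : lo = hi
    · subst heq
      rw [sorted_set_singleton scores lo hlo hhi]
      simp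
    · simp [heq]

-- ===== VERDICT (by name: the statement is the Claim_ definition above) =====
theorem compute_bins_spec : Claim_equal_compute_bins := by
  intro scores _
  exact compute_bins_eq scores
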